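-- pv_equiv track=rewrite | github.com/Bazinga9000/Bazbot | misc.py | rule_to_ncf
-- ===== SOURCE A (Python) =====
-- def rule_to_ncf(rule):
--     rings = rule.split("/")
--     ring_size = lambda n: ((2*n)+1)**2 - ((2*n)-1)**2
--     neighbors = []
--
--     for n,ring in enumerate(rings):
--         if ring == "": continue
--
--         step = lambda: (position[0] + delta[0], position[1] + delta[1])
--         outside = lambda x: abs(x[0]) > n+1 or abs(x[1]) > n+1
--
--         value = lambda x: list("0123456789ABCDEFGHIJKLMNOPQRSTUVWXYZ").index(x)
--
--         position = ((n+1),(n+1))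
--         delta = (0,-1)
--         for i in range(ring_size(n+1)):
--             v = value(ring[i%len(ring)])
--             if v != 0:
--                 neighbors.append((position,v))
--             if outside(step()):
--                 delta = (delta[1], -delta[0])
--             position = step()
--
--     return neighbors
-- ===== SOURCE B (Python) =====
-- ALPHABET = "0123456789ABCDEFGHIJKLMNOPQRSTUVWXYZ"
--
-- def rule_to_ncf(rule):
--     out = []
--     for n, ring in enumerate(rule.split("/")):
--         if ring == "":
--             continue
--         r = n + 1
--         coords = (
--             [(r, r - i) for i in range(2 * r)]
--             + [(r - i, -r) for i in range(2 * r)]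
--             + [(-r, -r + i) for i in range(2 * r)]
--             + [(-r + i, r) for i in range(2 * r)]
--         )
--         for i, pos in enumerate(coords):
--             v = ALPHABET.index(ring[i % len(ring)])
--             if v != 0:
--                 out.append((pos, v))
--     return out
-- ===== Notes on version B (the rewrite author's own statement) =====
-- stated objective: alternative
-- what changed: Replaces A's position/delta/turn spiral-walk state machine with an explicit per-ring table of the four clockwise perimeter edges followed by a single indexed pass over that table.
import Mathlib
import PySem

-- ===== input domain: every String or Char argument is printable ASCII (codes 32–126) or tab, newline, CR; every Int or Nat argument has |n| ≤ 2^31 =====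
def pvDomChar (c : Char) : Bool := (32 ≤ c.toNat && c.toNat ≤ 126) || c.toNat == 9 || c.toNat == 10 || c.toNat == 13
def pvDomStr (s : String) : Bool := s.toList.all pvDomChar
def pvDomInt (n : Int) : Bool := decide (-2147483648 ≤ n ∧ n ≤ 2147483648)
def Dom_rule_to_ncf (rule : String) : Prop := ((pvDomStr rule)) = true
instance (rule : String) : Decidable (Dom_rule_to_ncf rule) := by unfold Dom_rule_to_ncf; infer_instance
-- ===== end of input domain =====

-- B replaces A's spiral-walk state machine by an explicit table of the four perimeter edges
-- of each ring, traversed in one indexed pass (objective: alternative decomposition).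

-- ===== PORT A =====
-- value(x): Python raises ValueError when x is not in the digit/uppercase alphabet —
-- the port defaults to 0 there; Pre_rule_to_ncf excludes exactly those inputs.
def pvValueA (ring : List Char) (i : Int) : Int :=
  ((PySem.List.index? "0123456789ABCDEFGHIJKLMNOPQRSTUVWXYZ".toList
      (PySem.List.pyGetD ring (PySem.Int.mod i (ring.length : Int)) ' ')).map Int.ofNat).getD 0

-- one iteration of A's inner for-loop; state = (position, delta, neighbors)
def pvStepA (ring : List Char) (n : Int)
    (st : (Int × Int) × (Int × Int) × List ((Int × Int) × Int)) (i : Int) :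
    (Int × Int) × (Int × Int) × List ((Int × Int) × Int) :=
  let position := st.1
  let delta := st.2.1
  let neighbors := st.2.2
  let v := pvValueA ring i
  let neighbors := if v ≠ 0 then neighbors ++ [(position, v)] else neighbors
  let delta :=
    if n + 1 < |position.1 + delta.1| ∨ n + 1 < |position.2 + delta.2| then
      (delta.2, -delta.1)
    else delta
  ((position.1 + delta.1, position.2 + delta.2), delta, neighbors)

def rule_to_ncf (rule : String) : List ((Int × Int) × Int) :=
  let rings := PySem.Chars.splitOn rule.toList "/".toList
  (PySem.List.enumerate rings 0).foldl
    (fun neighbors p =>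
      let n := p.1
      let ring := p.2
      if ring = [] then neighbors
      else
        ((PySem.List.pyRange 0 ((2*(n+1)+1)^2 - (2*(n+1)-1)^2) 1).foldl
          (pvStepA ring n) ((n+1, n+1), (0, -1), neighbors)).2.2)
    []

-- ===== PORT B =====
def pvAlphabet : List Char := "0123456789ABCDEFGHIJKLMNOPQRSTUVWXYZ".toList

-- ALPHABET.index(x); defaults to 0 where Python raises ValueError (excluded by Pre_rule_to_ncf)
def pvValueB (ring : List Char) (i : Int) : Int :=
  ((PySem.List.index? pvAlphabet
      (PySem.List.pyGetD ring (PySem.Int.mod i (ring.length : Int)) ' ')).map Int.ofNat).getD 0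

-- the four clockwise perimeter edges of ring radius r
def pvRingCoords (r : Int) : List (Int × Int) :=
  (PySem.List.pyRange 0 (2*r) 1).map (fun i => (r, r - i)) ++
    ((PySem.List.pyRange 0 (2*r) 1).map (fun i => (r - i, -r)) ++
      ((PySem.List.pyRange 0 (2*r) 1).map (fun i => (-r, -r + i)) ++
        (PySem.List.pyRange 0 (2*r) 1).map (fun i => (-r + i, r))))

def rule_to_ncf_alt (rule : String) : List ((Int × Int) × Int) :=
  (PySem.List.enumerate (PySem.Chars.splitOn rule.toList "/".toList) 0).foldl
    (fun out p =>
      let ring := p.2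
      if ring = [] then out
      else
        let r := p.1 + 1
        (PySem.List.enumerate (pvRingCoords r) 0).foldl
          (fun out q =>
            let v := pvValueB ring q.1
            if v ≠ 0 then out ++ [(q.2, v)] else out)
          out)
    []

-- ===== PRECONDITION & SPEC =====
-- Pre_ excludes exactly the inputs where A raises ValueError: some ring character that the
-- loop actually reads (index j < min(len(ring), 8*(n+1))) lies outside the digit/uppercase alphabet.
def Pre_rule_to_ncf (rule : String) : Prop :=
  ∀ p ∈ PySem.List.enumerate (PySem.Chars.splitOn rule.toList "/".toList) 0,
    ∀ j : Nat, j < p.2.length → (j : Int) < 8 * (p.1 + 1) →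
      p.2.getD j ' ' ∈ "0123456789ABCDEFGHIJKLMNOPQRSTUVWXYZ".toList
instance (rule : String) : Decidable (Pre_rule_to_ncf rule) := by
  unfold Pre_rule_to_ncf; infer_instance

def pvWitness_rule_to_ncf : String := "12/0A3"

def Spec_rule_to_ncf (rule : String) (out : List ((Int × Int) × Int)) : Prop := out = rule_to_ncf_alt rule
instance (rule : String) (out : List ((Int × Int) × Int)) : Decidable (Spec_rule_to_ncf rule out) := by unfold Spec_rule_to_ncf; infer_instance

-- ===== CLAIM (what is proved, stated in full; the proofs are below) =====
def Claim_equal_rule_to_ncf : Prop := ∀ (rule : String), Dom_rule_to_ncf rule → Pre_rule_to_ncf rule → Spec_rule_to_ncf rule (rule_to_ncf rule)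

-- ===== LEMMAS AND PROOFS =====

-- closed form of A's walk: position and delta before step i of ring radius r (0 ≤ i < 8r)
def pvPos (r i : Int) : Int × Int :=
  if i < 2*r then (r, r - i)
  else if i < 4*r then (3*r - i, -r)
  else if i < 6*r then (-r, i - 5*r)
  else (i - 7*r, r)

def pvDel (r i : Int) : Int × Int :=
  if i < 2*r + 1 then (0, -1)
  else if i < 4*r + 1 then (-1, 0)
  else if i < 6*r + 1 then (0, 1)
  else (1, 0)

lemma stepA_eq (ring : List Char) (n i : Int) (hn : 0 ≤ n) (h0 : 0 ≤ i)
    (h8 : i < 8*(n+1)) (acc : List ((Int × Int) × Int)) :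
    pvStepA ring n (pvPos (n+1) i, pvDel (n+1) i, acc) i
      = (pvPos (n+1) (i+1), pvDel (n+1) (i+1),
          if pvValueA ring i ≠ 0 then acc ++ [(pvPos (n+1) i, pvValueA ring i)] else acc) := by
  rcases show i < 2*(n+1) ∨ i = 2*(n+1) ∨ (2*(n+1) < i ∧ i < 4*(n+1)) ∨ i = 4*(n+1) ∨
      (4*(n+1) < i ∧ i < 6*(n+1)) ∨ i = 6*(n+1) ∨ (6*(n+1) < i ∧ i < 8*(n+1)) from by omega with
    h | h | h | h | h | h | h
  · -- right edge, going down
    have hp : pvPos (n+1) i = (n+1, n+1 - i) := by simp only [pvPos]; rw [if_pos (by omega)]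
    have hd : pvDel (n+1) i = (0, -1) := by simp only [pvDel]; rw [if_pos (by omega)]
    have hd' : pvDel (n+1) (i+1) = (0, -1) := by simp only [pvDel]; rw [if_pos (by omega)]
    by_cases hc : i + 1 < 2*(n+1)
    · have hp' : pvPos (n+1) (i+1) = (n+1, n+1 - (i+1)) := by
        simp only [pvPos]; rw [if_pos (by omega)]
      rw [hp, hd, hp', hd']; simp only [pvStepA]
      rw [if_neg (by simp only [lt_abs]; omega)]
      simp [Prod.mk.injEq]; all_goals omega
    · have hp' : pvPos (n+1) (i+1) = (3*(n+1) - (i+1), -(n+1)) := by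
        simp only [pvPos]; rw [if_neg (by omega), if_pos (by omega)]
      rw [hp, hd, hp', hd']; simp only [pvStepA]
      rw [if_neg (by simp only [lt_abs]; omega)]
      simp [Prod.mk.injEq]; all_goals omega
  · -- corner (r, -r): turn
    have hp : pvPos (n+1) i = (3*(n+1) - i, -(n+1)) := by
      simp only [pvPos]; rw [if_neg (by omega), if_pos (by omega)]
    have hd : pvDel (n+1) i = (0, -1) := by simp only [pvDel]; rw [if_pos (by omega)]
    have hp' : pvPos (n+1) (i+1) = (3*(n+1) - (i+1), -(n+1)) := by
      simp only [pvPos]; rw [if_neg (by omega), if_pos (by omega)]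
    have hd' : pvDel (n+1) (i+1) = (-1, 0) := by
      simp only [pvDel]; rw [if_neg (by omega), if_pos (by omega)]
    rw [hp, hd, hp', hd']; simp only [pvStepA]
    rw [if_pos (by simp only [lt_abs]; omega)]
    simp [Prod.mk.injEq]; all_goals omega
  · -- bottom edge, going left
    have hp : pvPos (n+1) i = (3*(n+1) - i, -(n+1)) := by
      simp only [pvPos]; rw [if_neg (by omega), if_pos (by omega)]
    have hd : pvDel (n+1) i = (-1, 0) := by
      simp only [pvDel]; rw [if_neg (by omega), if_pos (by omega)]
    have hd' : pvDel (n+1) (i+1) = (-1, 0) := by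
      simp only [pvDel]; rw [if_neg (by omega), if_pos (by omega)]
    by_cases hc : i + 1 < 4*(n+1)
    · have hp' : pvPos (n+1) (i+1) = (3*(n+1) - (i+1), -(n+1)) := by
        simp only [pvPos]; rw [if_neg (by omega), if_pos (by omega)]
      rw [hp, hd, hp', hd']; simp only [pvStepA]
      rw [if_neg (by simp only [lt_abs]; omega)]
      simp [Prod.mk.injEq]; all_goals omega
    · have hp' : pvPos (n+1) (i+1) = (-(n+1), (i+1) - 5*(n+1)) := by
        simp only [pvPos]; rw [if_neg (by omega), if_neg (by omega), if_pos (by omega)]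
      rw [hp, hd, hp', hd']; simp only [pvStepA]
      rw [if_neg (by simp only [lt_abs]; omega)]
      simp [Prod.mk.injEq]; all_goals omega
  · -- corner (-r, -r): turn
    have hp : pvPos (n+1) i = (-(n+1), i - 5*(n+1)) := by
      simp only [pvPos]; rw [if_neg (by omega), if_neg (by omega), if_pos (by omega)]
    have hd : pvDel (n+1) i = (-1, 0) := by
      simp only [pvDel]; rw [if_neg (by omega), if_pos (by omega)]
    have hp' : pvPos (n+1) (i+1) = (-(n+1), (i+1) - 5*(n+1)) := by
      simp only [pvPos]; rw [if_neg (by omega), if_neg (by omega), if_pos (by omega)]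
    have hd' : pvDel (n+1) (i+1) = (0, 1) := by
      simp only [pvDel]; rw [if_neg (by omega), if_neg (by omega), if_pos (by omega)]
    rw [hp, hd, hp', hd']; simp only [pvStepA]
    rw [if_pos (by simp only [lt_abs]; omega)]
    simp [Prod.mk.injEq]; all_goals omega
  · -- left edge, going up
    have hp : pvPos (n+1) i = (-(n+1), i - 5*(n+1)) := by
      simp only [pvPos]; rw [if_neg (by omega), if_neg (by omega), if_pos (by omega)]
    have hd : pvDel (n+1) i = (0, 1) := by
      simp only [pvDel]; rw [if_neg (by omega), if_neg (by omega), if_pos (by omega)]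
    have hd' : pvDel (n+1) (i+1) = (0, 1) := by
      simp only [pvDel]; rw [if_neg (by omega), if_neg (by omega), if_pos (by omega)]
    by_cases hc : i + 1 < 6*(n+1)
    · have hp' : pvPos (n+1) (i+1) = (-(n+1), (i+1) - 5*(n+1)) := by
        simp only [pvPos]; rw [if_neg (by omega), if_neg (by omega), if_pos (by omega)]
      rw [hp, hd, hp', hd']; simp only [pvStepA]
      rw [if_neg (by simp only [lt_abs]; omega)]
      simp [Prod.mk.injEq]; all_goals omega
    · have hp' : pvPos (n+1) (i+1) = ((i+1) - 7*(n+1), n+1) := by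
        simp only [pvPos]; rw [if_neg (by omega), if_neg (by omega), if_neg (by omega)]
      rw [hp, hd, hp', hd']; simp only [pvStepA]
      rw [if_neg (by simp only [lt_abs]; omega)]
      simp [Prod.mk.injEq]; all_goals omega
  · -- corner (-r, r): turn
    have hp : pvPos (n+1) i = (i - 7*(n+1), n+1) := by
      simp only [pvPos]; rw [if_neg (by omega), if_neg (by omega), if_neg (by omega)]
    have hd : pvDel (n+1) i = (0, 1) := by
      simp only [pvDel]; rw [if_neg (by omega), if_neg (by omega), if_pos (by omega)]
    have hp' : pvPos (n+1) (i+1) = ((i+1) - 7*(n+1), n+1) := by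
      simp only [pvPos]; rw [if_neg (by omega), if_neg (by omega), if_neg (by omega)]
    have hd' : pvDel (n+1) (i+1) = (1, 0) := by
      simp only [pvDel]; rw [if_neg (by omega), if_neg (by omega), if_neg (by omega)]
    rw [hp, hd, hp', hd']; simp only [pvStepA]
    rw [if_pos (by simp only [lt_abs]; omega)]
    simp [Prod.mk.injEq]; all_goals omega
  · -- top edge, going right
    have hp : pvPos (n+1) i = (i - 7*(n+1), n+1) := by
      simp only [pvPos]; rw [if_neg (by omega), if_neg (by omega), if_neg (by omega)]
    have hd : pvDel (n+1) i = (1, 0) := by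
      simp only [pvDel]; rw [if_neg (by omega), if_neg (by omega), if_neg (by omega)]
    have hp' : pvPos (n+1) (i+1) = ((i+1) - 7*(n+1), n+1) := by
      simp only [pvPos]; rw [if_neg (by omega), if_neg (by omega), if_neg (by omega)]
    have hd' : pvDel (n+1) (i+1) = (1, 0) := by
      simp only [pvDel]; rw [if_neg (by omega), if_neg (by omega), if_neg (by omega)]
    rw [hp, hd, hp', hd']; simp only [pvStepA]
    rw [if_neg (by simp only [lt_abs]; omega)]
    simp [Prod.mk.injEq]; all_goals omega

lemma loopA (ring : List Char) (n : Int) (hn : 0 ≤ n) :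
    ∀ (k : Nat) (j : Int) (acc : List ((Int × Int) × Int)), 0 ≤ j → j + k = 8*(n+1) →
      ((PySem.List.pyRange j (8*(n+1)) 1).foldl (pvStepA ring n) (pvPos (n+1) j, pvDel (n+1) j, acc)).2.2
        = acc ++ ((PySem.List.pyRange j (8*(n+1)) 1).filter
              (fun i => decide (pvValueA ring i ≠ 0))).map
            (fun i => (pvPos (n+1) i, pvValueA ring i))
  | 0, j, acc, hj, hk => by
    rw [PySem.List.pyRange_one_eq_nil (by omega)]; simp
  | (k+1), j, acc, hj, hk => by
    rw [PySem.List.pyRange_one_cons (by omega)]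
    simp only [List.foldl_cons, List.filter_cons]
    rw [stepA_eq ring n j hn hj (by omega)]
    rw [loopA ring n hn k (j+1) _ (by omega) (by omega)]
    by_cases hv : pvValueA ring j = 0 <;> simp [hv]

lemma seg_eq (r a : Int) (hr : 1 ≤ r) (f : Int → Int × Int)
    (hf : ∀ k : Int, 0 ≤ k → k < 2*r → pvPos r (a + k) = f k) :
    (PySem.List.pyRange a (a + 2*r) 1).map (fun i => pvPos r i)
      = (PySem.List.pyRange 0 (2*r) 1).map f := by
  rw [PySem.List.pyRange_one, PySem.List.pyRange_one]
  simp only [List.map_map, add_sub_cancel_left, sub_zero]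
  refine List.map_congr_left ?_
  intro k hk
  simp only [List.mem_range] at hk
  simp only [Function.comp_apply, zero_add]
  exact hf k (by positivity) (by omega)

lemma coords_eq (r : Int) (hr : 1 ≤ r) :
    pvRingCoords r = (PySem.List.pyRange 0 (8*r) 1).map (fun i => pvPos r i) := by
  have h1 : (PySem.List.pyRange 0 (0 + 2*r) 1).map (fun i => pvPos r i)
      = (PySem.List.pyRange 0 (2*r) 1).map (fun i => (r, r - i)) := by
    refine seg_eq r 0 hr _ ?_
    intro k h0 h2
    simp only [pvPos, zero_add]; rw [if_pos (by omega)]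
  have h2 : (PySem.List.pyRange (0 + 2*r) (0 + 2*r + 2*r) 1).map (fun i => pvPos r i)
      = (PySem.List.pyRange 0 (2*r) 1).map (fun i => (r - i, -r)) := by
    refine seg_eq r (0 + 2*r) hr _ ?_
    intro k h0 h2
    simp only [pvPos]; rw [if_neg (by omega), if_pos (by omega)]
    simp [Prod.mk.injEq]; omega
  have h3 : (PySem.List.pyRange (0 + 2*r + 2*r) (0 + 2*r + 2*r + 2*r) 1).map (fun i => pvPos r i)
      = (PySem.List.pyRange 0 (2*r) 1).map (fun i => (-r, -r + i)) := by
    refine seg_eq r (0 + 2*r + 2*r) hr _ ?_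
    intro k h0 h2
    simp only [pvPos]; rw [if_neg (by omega), if_neg (by omega), if_pos (by omega)]
    simp [Prod.mk.injEq]; omega
  have h4 : (PySem.List.pyRange (0 + 2*r + 2*r + 2*r) (0 + 2*r + 2*r + 2*r + 2*r) 1).map (fun i => pvPos r i)
      = (PySem.List.pyRange 0 (2*r) 1).map (fun i => (-r + i, r)) := by
    refine seg_eq r (0 + 2*r + 2*r + 2*r) hr _ ?_
    intro k h0 h2
    simp only [pvPos]; rw [if_neg (by omega), if_neg (by omega), if_neg (by omega)]
    simp [Prod.mk.injEq]; omega
  rw [show (8:Int)*r = 0 + 2*r + 2*r + 2*r + 2*r by ring]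
  rw [PySem.List.pyRange_one_append 0 (0 + 2*r) (0+2*r+2*r+2*r+2*r) (by omega) (by omega)]
  rw [PySem.List.pyRange_one_append (0+2*r) (0+2*r+2*r) _ (by omega) (by omega)]
  rw [PySem.List.pyRange_one_append (0+2*r+2*r) (0+2*r+2*r+2*r) _ (by omega) (by omega)]
  simp only [List.map_append, h1, h2, h3, h4, pvRingCoords]

lemma enum_coords (r : Int) (hr : 1 ≤ r) :
    PySem.List.enumerate (pvRingCoords r) 0
      = (PySem.List.pyRange 0 (8*r) 1).map (fun i => (i, pvPos r i)) := by
  rw [coords_eq r hr]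
  rw [PySem.List.enumerate_eq_map_pyRange (d := ((0,0) : Int × Int))]
  simp only [List.length_map, PySem.List.len_eq, PySem.List.length_pyRange_one]
  rw [show (((8*r - 0).toNat : Int)) = 8*r by omega]
  refine List.map_congr_left ?_
  intro j hj
  rw [PySem.List.mem_pyRange_one] at hj
  rw [PySem.List.pyGetD_map_pyRange_of_nonneg _ _ _ _ (by omega) (by omega)]

lemma foldl_append_if_filter (l : List Int) (v : Int → Int) (g : Int → (Int × Int)) :
    ∀ acc : List ((Int × Int) × Int),
      l.foldl (fun out i => if v i ≠ 0 then out ++ [(g i, v i)] else out) acc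
        = acc ++ (l.filter (fun i => decide (v i ≠ 0))).map (fun i => (g i, v i)) := by
  induction l with
  | nil => intro acc; simp
  | cons x xs ih =>
    intro acc
    simp only [List.foldl_cons, List.filter_cons]
    rw [ih]
    by_cases hv : v x = 0 <;> simp [hv]

lemma ring_eq (n : Int) (hn : 0 ≤ n) (ring : List Char)
    (acc : List ((Int × Int) × Int)) :
    ((PySem.List.pyRange 0 ((2*(n+1)+1)^2 - (2*(n+1)-1)^2) 1).foldl
        (pvStepA ring n) ((n+1, n+1), (0, -1), acc)).2.2
      = (PySem.List.enumerate (pvRingCoords (n+1)) 0).foldl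
          (fun out q =>
            let v := pvValueB ring q.1
            if v ≠ 0 then out ++ [(q.2, v)] else out)
          acc := by
  have hsz : ((2*(n+1)+1)^2 - (2*(n+1)-1)^2 : Int) = 8*(n+1) := by ring
  have hinit : (((n+1 : Int), (n+1 : Int)), ((0 : Int), (-1 : Int)), acc)
      = (pvPos (n+1) 0, pvDel (n+1) 0, acc) := by
    simp only [pvPos, pvDel]
    rw [if_pos (by omega), if_pos (by omega)]
    norm_num
  rw [hsz, hinit, loopA ring n hn (8*(n+1)).toNat 0 acc le_rfl (by omega)]
  rw [enum_coords (n+1) (by omega), List.foldl_map]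
  exact (foldl_append_if_filter (PySem.List.pyRange 0 (8*(n+1)) 1)
    (fun i => pvValueA ring i) (fun i => pvPos (n+1) i) acc).symm

lemma rings_fold (rings : List (List Char)) :
    ∀ (s : Int), 0 ≤ s → ∀ (acc : List ((Int × Int) × Int)),
      (PySem.List.enumerate rings s).foldl
        (fun neighbors p =>
          let n := p.1
          let ring := p.2
          if ring = [] then neighbors
          else
            ((PySem.List.pyRange 0 ((2*(n+1)+1)^2 - (2*(n+1)-1)^2) 1).foldl
              (pvStepA ring n) ((n+1, n+1), (0, -1), neighbors)).2.2)
        acc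
      = (PySem.List.enumerate rings s).foldl
          (fun out p =>
            let ring := p.2
            if ring = [] then out
            else
              let r := p.1 + 1
              (PySem.List.enumerate (pvRingCoords r) 0).foldl
                (fun out q =>
                  let v := pvValueB ring q.1
                  if v ≠ 0 then out ++ [(q.2, v)] else out)
                out)
          acc := by
  induction rings with
  | nil => intro s hs acc; rfl
  | cons ring rest ih =>
    intro s hs acc
    simp only [PySem.List.enumerate_cons, List.foldl_cons]
    by_cases he : ring = []
    · simp only [he, ↓reduceIte]
      exact ih (s+1) (by omega) acc
    · simp only [if_neg he]
      rw [ring_eq s hs ring acc]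
      exact ih (s+1) (by omega) _

-- ===== VERDICT (by name: the statement is the Claim_ definition above) =====
theorem rule_to_ncf_spec : Claim_equal_rule_to_ncf := by
  intro rule _hdom _hpre
  unfold Spec_rule_to_ncf rule_to_ncf rule_to_ncf_alt
  exact rings_fold (PySem.Chars.splitOn rule.toList "/".toList) 0 le_rfl []
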